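-- pv_equiv track=rewrite | github.com/questinrest/doc-struct-rag | scraping/scrape_page.py | normalize_code_block
-- ===== SOURCE A (Python) =====
-- def normalize_code_block(raw_text: str) -> str:
--     """
--     Normalize scraped code text by:
--     1. Removing leading/trailing empty lines
--     2. Collapsing multiple internal blank lines to one
--     3. Preserving indentation and code structure
--     """
--
--     # Split into lines (preserves indentation)
--     lines = raw_text.splitlines()
--
--     # 1. Remove leading empty lines
--     while lines and lines[0].strip() == "":
--         lines.pop(0)
--
--     # 2. Remove trailing empty lines
--     while lines and lines[-1].strip() == "":
--         lines.pop()
--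
--     # 3. Collapse multiple blank lines inside code
--     normalized_lines = []
--     previous_blank = False
--
--     for line in lines:
--         if line.strip() == "":
--             if not previous_blank:
--                 normalized_lines.append("")
--             previous_blank = True
--         else:
--             normalized_lines.append(line)
--             previous_blank = False
--
--     # Rejoin
--     clean_code = "\n".join(normalized_lines)
--
--     return f"CODE\n{clean_code}\n/CODE"
-- ===== SOURCE B (Python) =====
-- from itertools import groupby
--
--
-- def normalize_code_block(raw_text: str) -> str:
--     lines = raw_text.splitlines()
--     groups = [(blank, list(run))
--               for blank, run in groupby(lines, key=lambda l: l.strip() == "")]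
--     if groups and groups[0][0]:
--         groups = groups[1:]
--     if groups and groups[-1][0]:
--         groups = groups[:-1]
--     out = []
--     for blank, run in groups:
--         out.extend([""] if blank else run)
--     return f"CODE\n" + "\n".join(out) + "\n/CODE"
-- ===== Notes on version B (the rewrite author's own statement) =====
-- stated objective: alternative
-- what changed: Replaces A's two pop-loops plus a previous_blank state machine by a single itertools.groupby pass that splits the lines into blank/non-blank runs, drops a leading and a trailing blank group, and flattens each remaining blank run to one empty line.
import Mathlib
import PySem

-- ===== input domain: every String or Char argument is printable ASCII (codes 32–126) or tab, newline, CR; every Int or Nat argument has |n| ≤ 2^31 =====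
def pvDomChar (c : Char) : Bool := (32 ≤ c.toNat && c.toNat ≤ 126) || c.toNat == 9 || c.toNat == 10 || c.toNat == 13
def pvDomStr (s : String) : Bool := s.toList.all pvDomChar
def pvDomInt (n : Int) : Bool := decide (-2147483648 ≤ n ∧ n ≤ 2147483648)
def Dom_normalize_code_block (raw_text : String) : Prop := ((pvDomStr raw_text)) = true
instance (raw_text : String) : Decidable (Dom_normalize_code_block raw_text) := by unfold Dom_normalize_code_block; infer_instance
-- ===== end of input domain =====

-- B replaces A's two pop-loops plus previous_blank state machine by one grouping pass
-- (runs of blank/non-blank lines), a group-level trim and a flatten (objective: alternative decomposition).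

def nb_blank (l : String) : Bool := PySem.Str.strip l == ""

-- ===== PORT A =====
-- while lines and lines[0].strip() == "": lines.pop(0)
def nb_dropLeading : List String → List String
  | [] => []
  | x :: xs => if nb_blank x then nb_dropLeading xs else x :: xs

-- while lines and lines[-1].strip() == "": lines.pop()
def nb_popTrailing : List String → List String
  | [] => []
  | x :: xs =>
    match nb_popTrailing xs with
    | [] => if nb_blank x then [] else [x]
    | ys => x :: ys

def normalize_code_block (raw_text : String) : String :=
  let lines := PySem.Str.splitlines raw_text
  let lines := nb_dropLeading lines
  let lines := nb_popTrailing lines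
  let st := lines.foldl
    (fun (st : List String × Bool) line =>
      if nb_blank line then
        (if st.2 then st else (st.1 ++ [""], true))
      else (st.1 ++ [line], false))
    ([], false)
  "CODE\n" ++ PySem.Str.join "\n" st.1 ++ "\n/CODE"

-- ===== PORT B =====
-- itertools.groupby(lines, key = blank): maximal runs with their key
def nb_groupRuns : List String → List (Bool × List String)
  | [] => []
  | x :: xs =>
    (nb_blank x, x :: xs.takeWhile (fun y => nb_blank y == nb_blank x)) ::
      nb_groupRuns (xs.dropWhile (fun y => nb_blank y == nb_blank x))
termination_by l => l.length
decreasing_by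
  simpa [Nat.lt_succ_iff] using List.length_dropWhile_le (fun y => nb_blank y == nb_blank x) xs

-- if groups and groups[0][0]: groups = groups[1:]
def nb_trimFirst (gs : List (Bool × List String)) : List (Bool × List String) :=
  match gs with
  | g :: t => if g.1 then t else gs
  | [] => gs

-- if groups and groups[-1][0]: groups = groups[:-1]
def nb_trimLast (gs : List (Bool × List String)) : List (Bool × List String) :=
  match gs.getLast? with
  | some g => if g.1 then gs.dropLast else gs
  | none => gs

def normalize_code_block_alt (raw_text : String) : String :=
  let gs := nb_trimLast (nb_trimFirst (nb_groupRuns (PySem.Str.splitlines raw_text)))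
  let out := gs.flatMap (fun g => if g.1 then [""] else g.2)
  "CODE\n" ++ PySem.Str.join "\n" out ++ "\n/CODE"

-- ===== PRECONDITION & SPEC =====
def Spec_normalize_code_block (raw_text : String) (out : String) : Prop := out = normalize_code_block_alt raw_text
instance (raw_text : String) (out : String) : Decidable (Spec_normalize_code_block raw_text out) := by unfold Spec_normalize_code_block; infer_instance

-- ===== CLAIM (what is proved, stated in full; the proofs are below) =====
def Claim_equal_normalize_code_block : Prop := ∀ (raw_text : String), Dom_normalize_code_block raw_text → Spec_normalize_code_block raw_text (normalize_code_block raw_text)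

-- ===== LEMMAS AND PROOFS =====

-- A's collapse loop, written as a structural recursion on (remaining lines, previous_blank)
def nb_c : List String → Bool → List String
  | [], _ => []
  | x :: xs, prev =>
    if nb_blank x then (if prev then nb_c xs true else "" :: nb_c xs true)
    else x :: nb_c xs false

theorem nb_fold_c (xs : List String) (acc : List String) (prev : Bool) :
    (xs.foldl
      (fun (st : List String × Bool) line =>
        if nb_blank line then
          (if st.2 then st else (st.1 ++ [""], true))
        else (st.1 ++ [line], false))
      (acc, prev)).1 = acc ++ nb_c xs prev := by
  induction xs generalizing acc prev with
  | nil => simp [nb_c]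
  | cons x xs ih =>
    simp only [List.foldl_cons, nb_c]
    by_cases hb : nb_blank x <;> by_cases hp : prev <;>
      simp [hb, hp, ih]

theorem nb_dropLeading_eq (xs : List String) :
    nb_dropLeading xs = xs.dropWhile nb_blank := by
  induction xs with
  | nil => rfl
  | cons x xs ih =>
    by_cases hb : nb_blank x <;> simp [nb_dropLeading, hb, ih]

theorem nb_pop_cons (x : String) (xs : List String) :
    nb_popTrailing (x :: xs) =
      match nb_popTrailing xs with
      | [] => if nb_blank x then [] else [x]
      | ys => x :: ys := rfl

theorem nb_popTrailing_nil_iff (xs : List String) :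
    nb_popTrailing xs = [] ↔ ∀ y ∈ xs, nb_blank y = true := by
  induction xs with
  | nil => simp [nb_popTrailing]
  | cons x xs ih =>
    rw [nb_pop_cons]
    cases h : nb_popTrailing xs with
    | nil =>
      by_cases hb : nb_blank x <;> simp_all
    | cons y ys =>
      simp only
      constructor
      · intro hcon; cases hcon
      · intro hall
        have : nb_popTrailing xs = [] := ih.mpr (fun z hz => hall z (List.mem_cons_of_mem _ hz))
        rw [this] at h; cases h

theorem nb_popTrailing_all_nonblank (xs : List String)
    (h : ∀ y ∈ xs, nb_blank y = false) : nb_popTrailing xs = xs := by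
  induction xs with
  | nil => rfl
  | cons x xs ih =>
    have hx : nb_blank x = false := h x (List.mem_cons_self ..)
    have ih' : nb_popTrailing xs = xs := ih (fun y hy => h y (List.mem_cons_of_mem _ hy))
    rw [nb_pop_cons, ih']
    cases xs with
    | nil => simp [hx]
    | cons b bs => rfl

theorem nb_popTrailing_append (as bs : List String) :
    nb_popTrailing (as ++ bs) =
      if nb_popTrailing bs = [] then nb_popTrailing as else as ++ nb_popTrailing bs := by
  induction as with
  | nil => split_ifs with h <;> simp [nb_popTrailing, h]
  | cons a as ih =>
    rw [List.cons_append, nb_pop_cons, ih]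
    by_cases h : nb_popTrailing bs = []
    · rw [if_pos h, if_pos h]
      exact (nb_pop_cons a as).symm
    · rw [if_neg h, if_neg h]
      cases h' : as ++ nb_popTrailing bs with
      | nil =>
        rcases List.append_eq_nil_iff.mp h' with ⟨-, h2⟩
        exact absurd h2 h
      | cons z zs => simp [h']

theorem nb_popTrailing_head (x : String) (xs : List String) :
    nb_popTrailing (x :: xs) = [] ∨ ∃ ys, nb_popTrailing (x :: xs) = x :: ys := by
  rw [nb_pop_cons]
  cases h : nb_popTrailing xs with
  | nil =>
    by_cases hb : nb_blank x
    · left; simp [hb]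
    · right; exact ⟨[], by simp [hb]⟩
  | cons y ys => right; exact ⟨y :: ys, rfl⟩

theorem nb_c_nonblank (as bs : List String) (h : ∀ y ∈ as, nb_blank y = false) :
    nb_c (as ++ bs) false = as ++ nb_c bs false := by
  induction as with
  | nil => rfl
  | cons a as ih =>
    have ha : nb_blank a = false := h a (List.mem_cons_self ..)
    simp [nb_c, ha, ih (fun y hy => h y (List.mem_cons_of_mem _ hy))]

theorem nb_c_head_nonblank (cs : List String)
    (h : cs = [] ∨ ∃ y ys, cs = y :: ys ∧ nb_blank y = false) :
    nb_c cs true = nb_c cs false := by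
  rcases h with rfl | ⟨y, ys, rfl, hy⟩
  · rfl
  · simp [nb_c, hy]

theorem nb_c_blank_skip (bs cs : List String) (h : ∀ y ∈ bs, nb_blank y = true) :
    nb_c (bs ++ cs) true = nb_c cs true := by
  induction bs with
  | nil => rfl
  | cons b bs ih =>
    have hb : nb_blank b = true := h b (List.mem_cons_self ..)
    simp [nb_c, hb, ih (fun y hy => h y (List.mem_cons_of_mem _ hy))]

theorem nb_c_blank_run (b : String) (bs cs : List String)
    (hb : nb_blank b = true) (h : ∀ y ∈ bs, nb_blank y = true)
    (hcs : cs = [] ∨ ∃ y ys, cs = y :: ys ∧ nb_blank y = false) :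
    nb_c ((b :: bs) ++ cs) false = "" :: nb_c cs false := by
  simp only [List.cons_append, nb_c, hb, if_true, Bool.false_eq_true, if_false]
  rw [nb_c_blank_skip bs cs h, nb_c_head_nonblank cs hcs]

theorem nb_trimLast_cons (g : Bool × List String) (gs : List (Bool × List String))
    (h : gs ≠ []) : nb_trimLast (g :: gs) = g :: nb_trimLast gs := by
  cases gs with
  | nil => exact absurd rfl h
  | cons b t =>
    simp only [nb_trimLast, List.getLast?_cons_cons]
    cases h' : (b :: t).getLast? with
    | none => simp at h'
    | some g' =>
      by_cases hg : g'.1 <;> simp [hg, List.dropLast_cons₂]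

theorem nb_dropWhile_head (p : String → Bool) (l : List String) :
    l.dropWhile p = [] ∨ ∃ y ys, l.dropWhile p = y :: ys ∧ p y = false := by
  induction l with
  | nil => left; rfl
  | cons x xs ih =>
    by_cases hx : p x
    · simpa [hx] using ih
    · right; exact ⟨x, xs, by simp [List.dropWhile_cons, hx], by simp [hx]⟩

theorem nb_groupRuns_nil : nb_groupRuns ([] : List String) = [] := by
  simp [nb_groupRuns]

theorem nb_main (xs : List String) :
    (nb_trimLast (nb_groupRuns xs)).flatMap (fun g => if g.1 then [""] else g.2) =
      nb_c (nb_popTrailing xs) false := by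
  induction xs using nb_groupRuns.induct with
  | case1 => simp [nb_groupRuns_nil, nb_trimLast, nb_popTrailing, nb_c]
  | case2 x xs ih =>
    set p : String → Bool := fun y => nb_blank y == nb_blank x with hp
    have hxs : xs = xs.takeWhile p ++ xs.dropWhile p := (List.takeWhile_append_dropWhile ..).symm
    have hrun : ∀ y ∈ xs.takeWhile p, nb_blank y = nb_blank x := by
      intro y hy
      have := List.mem_takeWhile_imp hy
      simpa [hp] using this
    rw [show nb_groupRuns (x :: xs) =
        (nb_blank x, x :: xs.takeWhile p) :: nb_groupRuns (xs.dropWhile p) from by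
      rw [nb_groupRuns]]
    by_cases hx : nb_blank x
    · -- leading group is blank
      cases hrest : xs.dropWhile p with
      | nil =>
        -- everything is blank
        rw [nb_groupRuns_nil]
        have hpop : nb_popTrailing (x :: xs) = [] := by
          rw [nb_popTrailing_nil_iff]
          intro y hy
          rcases List.mem_cons.mp hy with rfl | hy
          · exact hx
          · rw [hxs, hrest, List.append_nil] at hy
            rw [hrun y hy]; exact hx
        rw [hpop]
        simp [nb_trimLast, hx, nb_c]
      | cons b rest' =>
        rw [← hrest]
        have hGne : nb_groupRuns (xs.dropWhile p) ≠ [] := by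
          rw [hrest]; rw [nb_groupRuns]; simp
        have hbnb : nb_blank b = false := by
          rcases nb_dropWhile_head p xs with h0 | ⟨y, ys, h0, hy⟩
          · rw [h0] at hrest; cases hrest
          · rw [h0] at hrest
            injection hrest with h1 h2; subst h1
            simpa [hp, hx] using hy
        rw [nb_trimLast_cons _ _ hGne, List.flatMap_cons, ih]
        rw [show (if (nb_blank x, x :: xs.takeWhile p).1 = true then [""]
            else (nb_blank x, x :: xs.takeWhile p).2) = [""] from by simp [hx]]
        have hne : nb_popTrailing (xs.dropWhile p) ≠ [] := by
          intro hcon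
          have := (nb_popTrailing_nil_iff _).mp hcon b (by rw [hrest]; exact List.mem_cons_self ..)
          rw [hbnb] at this; cases this
        rw [show nb_popTrailing (x :: xs) =
            (x :: xs.takeWhile p) ++ nb_popTrailing (xs.dropWhile p) from by
          conv_lhs => rw [show x :: xs = (x :: xs.takeWhile p) ++ xs.dropWhile p from by
            rw [List.cons_append, ← hxs]]
          rw [nb_popTrailing_append, if_neg hne]]
        have hhead : nb_popTrailing (xs.dropWhile p) = [] ∨
            ∃ y ys, nb_popTrailing (xs.dropWhile p) = y :: ys ∧ nb_blank y = false := by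
          rw [hrest]
          rcases nb_popTrailing_head b rest' with h0 | ⟨ys, h0⟩
          · exact Or.inl h0
          · exact Or.inr ⟨b, ys, h0, hbnb⟩
        rw [nb_c_blank_run x (xs.takeWhile p) _ hx (fun y hy => by rw [hrun y hy]; exact hx) hhead]
        simp
    · -- leading group is non-blank
      have hxf : nb_blank x = false := by simpa using hx
      have hallnb : ∀ y ∈ x :: xs.takeWhile p, nb_blank y = false := by
        intro y hy
        rcases List.mem_cons.mp hy with rfl | hy
        · exact hxf
        · rw [hrun y hy]; exact hxf
      cases hrest : xs.dropWhile p with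
      | nil =>
        rw [nb_groupRuns_nil]
        have hxs2 : List.takeWhile p xs = xs := by
          conv_rhs => rw [hxs, hrest, List.append_nil]
        have hallnb' : ∀ y ∈ x :: xs, nb_blank y = false := by
          intro y hy
          exact hallnb y (by rw [hxs2]; exact hy)
        rw [hxs2, nb_popTrailing_all_nonblank _ hallnb']
        have hc : nb_c (x :: xs) false = x :: xs := by
          have h0 := nb_c_nonblank (x :: xs) [] hallnb'
          simpa [nb_c] using h0
        simp [nb_trimLast, hxf, hc]
      | cons b rest' =>
        rw [← hrest]
        have hGne : nb_groupRuns (xs.dropWhile p) ≠ [] := by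
          rw [hrest]; rw [nb_groupRuns]; simp
        rw [nb_trimLast_cons _ _ hGne, List.flatMap_cons, ih]
        rw [show (if (nb_blank x, x :: xs.takeWhile p).1 = true then [""]
            else (nb_blank x, x :: xs.takeWhile p).2) = x :: xs.takeWhile p from by simp [hxf]]
        have hsplit0 : x :: xs = (x :: xs.takeWhile p) ++ xs.dropWhile p := by
          rw [List.cons_append, ← hxs]
        by_cases hne : nb_popTrailing (xs.dropWhile p) = []
        · rw [show nb_popTrailing (x :: xs) = x :: xs.takeWhile p from by
            conv_lhs => rw [hsplit0]
            rw [nb_popTrailing_append, if_pos hne]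
            exact nb_popTrailing_all_nonblank _ hallnb]
          have hc := nb_c_nonblank (x :: xs.takeWhile p) [] hallnb
          rw [List.append_nil] at hc
          rw [hne, hc]
        · rw [show nb_popTrailing (x :: xs) =
              (x :: xs.takeWhile p) ++ nb_popTrailing (xs.dropWhile p) from by
            conv_lhs => rw [hsplit0]
            rw [nb_popTrailing_append, if_neg hne]]
          rw [nb_c_nonblank _ _ hallnb]

theorem nb_trimFirst_eq (xs : List String) :
    nb_trimFirst (nb_groupRuns xs) = nb_groupRuns (xs.dropWhile nb_blank) := by
  cases xs with
  | nil => simp [nb_groupRuns_nil, nb_trimFirst]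
  | cons x xs =>
    rw [nb_groupRuns]
    by_cases hx : nb_blank x
    · simp [nb_trimFirst, hx]
    · simp [nb_trimFirst, hx, nb_groupRuns]

-- ===== VERDICT (by name: the statement is the Claim_ definition above) =====
theorem normalize_code_block_spec : Claim_equal_normalize_code_block := by
  intro raw_text _
  unfold Spec_normalize_code_block normalize_code_block normalize_code_block_alt
  simp only
  congr 2
  rw [nb_trimFirst_eq, nb_main, nb_fold_c, nb_dropLeading_eq, List.nil_append]
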